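-- pv_equiv track=rewrite | github.com/Julia264/real-estate-chatbot | functions.py | find_city_ids_for_location
-- ===== SOURCE A (Python) =====
-- def find_city_ids_for_location(location_input, city_map):
--     location_input = location_input.strip().lower()
--     matched_city_ids = []
--
--     for city_id, aliases in city_map.items():
--         for alias in aliases:
--             if alias in location_input:
--                 matched_city_ids.append(city_id)
--                 break  # stop checking aliases for this city once matched
--
--     return matched_city_ids
-- ===== SOURCE B (Python) =====
-- def find_city_ids_for_location(location_input, city_map):
--     # Index the input once: collect every substring of s whose length is the
--     # length of some alias; each alias is then answered by one set lookup.
--     s = location_input.strip().lower()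
--     n = len(s)
--     lengths = {len(a) for aliases in city_map.values()
--                for a in aliases if len(a) <= n}
--     subs = {s[i:i + l] for l in lengths for i in range(n - l + 1)}
--     return [cid for cid, aliases in city_map.items()
--             if any(a in subs for a in aliases)]
-- ===== Notes on version B (the rewrite author's own statement) =====
-- stated objective: faster
-- what changed: Instead of scanning the input once per alias per city, B builds a set index of all substrings of the normalized input whose length is some alias length, then answers each alias by a single set lookup in one filter pass over city_map.
import Mathlib
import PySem

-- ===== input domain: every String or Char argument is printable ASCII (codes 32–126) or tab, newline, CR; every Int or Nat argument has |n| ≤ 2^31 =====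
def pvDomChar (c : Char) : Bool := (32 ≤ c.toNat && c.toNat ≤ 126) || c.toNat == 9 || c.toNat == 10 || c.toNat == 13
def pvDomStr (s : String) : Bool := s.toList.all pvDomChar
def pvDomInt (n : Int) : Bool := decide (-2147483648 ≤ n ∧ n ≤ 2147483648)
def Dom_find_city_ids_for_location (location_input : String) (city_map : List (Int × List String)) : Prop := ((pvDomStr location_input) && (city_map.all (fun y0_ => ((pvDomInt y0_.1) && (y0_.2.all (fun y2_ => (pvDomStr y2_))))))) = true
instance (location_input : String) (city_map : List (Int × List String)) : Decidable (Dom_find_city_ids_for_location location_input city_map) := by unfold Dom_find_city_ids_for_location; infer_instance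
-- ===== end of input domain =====

-- B replaces A's per-alias substring scan of the input by a set index of the input's
-- substrings (alias lengths only), answering each alias by one set lookup (measured faster).


-- ===== PORT A =====
-- inner 'for alias in aliases: if alias in location_input: append; break'
def pvA_inner (s : String) (acc : List Int) (cid : Int) : List String → List Int
  | [] => acc
  | a :: rest => if PySem.Str.isIn a s then acc ++ [cid] else pvA_inner s acc cid rest

def find_city_ids_for_location (location_input : String) (city_map : List (Int × List String)) : List Int :=
  let s := PySem.Str.lower (PySem.Str.strip location_input)
  city_map.foldl (fun acc p => pvA_inner s acc p.1 p.2) []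

-- ===== PORT B =====
-- lengths = {len(a) for aliases in city_map.values() for a in aliases if len(a) <= n}
-- subs = {s[i:i+l] for l in lengths for i in range(n - l + 1)}
def pvSubs (s : String) (city_map : List (Int × List String)) : PySem.Set String :=
  let n : Int := PySem.Str.len s
  let lengths : PySem.Set Int := PySem.Set.ofList (city_map.flatMap (fun p =>
    (p.2.filter (fun a => decide (PySem.Str.len a ≤ n))).map PySem.Str.len))
  PySem.Set.ofList (lengths.flatMap (fun l =>
    (PySem.List.pyRange 0 (n - l + 1)).map (fun i => PySem.Str.slice s (some i) (some (i + l)))))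

def find_city_ids_for_location_alt (location_input : String) (city_map : List (Int × List String)) : List Int :=
  let s := PySem.Str.lower (PySem.Str.strip location_input)
  let subs := pvSubs s city_map
  (city_map.filter (fun p => p.2.any (fun a => PySem.Set.contains subs a))).map (·.1)

-- ===== PRECONDITION & SPEC =====
def Spec_find_city_ids_for_location (location_input : String) (city_map : List (Int × List String)) (out : List Int) : Prop := out = find_city_ids_for_location_alt location_input city_map
instance (location_input : String) (city_map : List (Int × List String)) (out : List Int) : Decidable (Spec_find_city_ids_for_location location_input city_map out) := by unfold Spec_find_city_ids_for_location; infer_instance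

-- ===== CLAIM (what is proved, stated in full; the proofs are below) =====
def Claim_equal_find_city_ids_for_location : Prop := ∀ (location_input : String) (city_map : List (Int × List String)), Dom_find_city_ids_for_location location_input city_map → Spec_find_city_ids_for_location location_input city_map (find_city_ids_for_location location_input city_map)

-- ===== LEMMAS AND PROOFS =====

-- every member of the substring index is an infix of s
theorem mem_pvSubs_infix (s : String) (m : List (Int × List String)) (x : String)
    (hx : x ∈ pvSubs s m) :
    x.toList <:+: s.toList ∧ (x.toList.length : Int) ≤ PySem.Str.len s := by
  unfold pvSubs at hx
  simp only [PySem.Set.mem_ofList, List.mem_flatMap, List.mem_map, List.mem_filter,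
    PySem.List.mem_pyRange_one, decide_eq_true_eq] at hx
  obtain ⟨l, ⟨p, hp, a', ⟨_, hle⟩, rfl⟩, i, ⟨hi0, hin⟩, rfl⟩ := hx
  have hl0 : (0 : Int) ≤ PySem.Str.len a' := by simp [PySem.Str.len]
  have hslice : (PySem.Str.slice s (some i) (some (i + PySem.Str.len a'))).toList =
      (s.toList.drop i.toNat).take ((i + PySem.Str.len a').toNat - i.toNat) := by
    simp only [PySem.Str.toList_slice, PySem.Chars.slice_eq_listSlice]
    rw [PySem.List.slice_toNat _ hi0 (by omega)]
  constructor
  · rw [hslice]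
    exact ((List.take_prefix _ _).isInfix).trans (List.drop_suffix _ _).isInfix
  · rw [hslice]
    simp only [List.length_take, List.length_drop, PySem.Str.len]
      at hin hl0 ⊢
    omega

-- membership in the substring index is exactly Python's 'a in s', for aliases of city_map
theorem contains_pvSubs (s : String) (m : List (Int × List String)) (a : String)
    (ha : ∃ p ∈ m, a ∈ p.2) :
    PySem.Set.contains (pvSubs s m) a = PySem.Str.isIn a s := by
  rw [Bool.eq_iff_iff, PySem.Set.contains_iff, PySem.Str.isIn_iff_infix]
  constructor
  · exact fun h => (mem_pvSubs_infix s m a h).1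
  · rintro ⟨t, u, h⟩
    have hlen : t.length + a.toList.length ≤ s.toList.length := by rw [← h]; simp
    obtain ⟨p, hp, hap⟩ := ha
    unfold pvSubs
    simp only [PySem.Set.mem_ofList, List.mem_flatMap, List.mem_map, List.mem_filter,
      PySem.List.mem_pyRange_one, decide_eq_true_eq]
    refine ⟨PySem.Str.len a, ⟨p, hp, a, ⟨hap, ?_⟩, rfl⟩,
      (t.length : Int), ⟨by omega, ?_⟩, ?_⟩
    · simp only [PySem.Str.len]; omega
    · simp only [PySem.Str.len]; omega
    · rw [← String.toList_inj]
      simp only [PySem.Str.toList_slice, PySem.Chars.slice_eq_listSlice,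
        PySem.Str.len]
      rw [PySem.List.slice_natCast_add s.toList t.length a.toList.length, ← h]
      simp

-- A's inner loop with break = 'any' deciding an append
theorem pvA_inner_eq (s : String) (acc : List Int) (cid : Int) (as : List String) :
    pvA_inner s acc cid as =
      if as.any (fun a => PySem.Str.isIn a s) then acc ++ [cid] else acc := by
  induction as with
  | nil => simp [pvA_inner]
  | cons a rest ih =>
    cases h : PySem.Str.isIn a s with
    | true => simp only [pvA_inner, h, if_true, List.any_cons, Bool.true_or]
    | false => simp only [pvA_inner, h, Bool.false_eq_true, if_false, ih, List.any_cons,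
        Bool.false_or]

theorem foldA_eq (s : String) (m : List (Int × List String)) (acc : List Int) :
    m.foldl (fun acc p => pvA_inner s acc p.1 p.2) acc =
      acc ++ (m.filter (fun p => p.2.any (fun a => PySem.Str.isIn a s))).map (·.1) := by
  induction m generalizing acc with
  | nil => simp
  | cons p rest ih =>
    rw [List.foldl_cons, pvA_inner_eq, ih, List.filter_cons]
    by_cases h : (p.2.any fun a => PySem.Str.isIn a s) = true
    · rw [if_pos h, if_pos h]; simp
    · rw [if_neg h, if_neg h]

-- ===== VERDICT (by name: the statement is the Claim_ definition above) =====
theorem find_city_ids_for_location_spec : Claim_equal_find_city_ids_for_location := by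
  intro loc m _
  unfold Spec_find_city_ids_for_location find_city_ids_for_location find_city_ids_for_location_alt
  rw [foldA_eq, List.nil_append]
  refine congrArg _ (List.filter_congr fun p hp => ?_)
  rw [Bool.eq_iff_iff, List.any_eq_true, List.any_eq_true]
  exact ⟨fun ⟨a, haa, hh⟩ => ⟨a, haa, by rw [contains_pvSubs _ m a ⟨p, hp, haa⟩]; exact hh⟩,
    fun ⟨a, haa, hh⟩ => ⟨a, haa, by rw [← contains_pvSubs _ m a ⟨p, hp, haa⟩]; exact hh⟩⟩
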